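-- pv_equiv track=rewrite | github.com/reginaib/Programming | Series_08/demo/bus gossip.py | busgossip
-- ===== SOURCE A (Python) =====
-- def busgossip(routes):
--
--     """
--     >>> busgossip(((1, 2, 3, 4, 5), (5, 6, 7, 8), (3, 9, 6)))
--     12
--     >>> busgossip(((1, 2, 3), (2, 1, 3), (2, 4, 5, 3)))
--     4
--     >>> busgossip(((1, 2), (2, 1)))
--     -1
--     >>> busgossip(((11, 2, 2, 4, 8, 2, 2), (0, 11, 8), (11, 8, 10, 3, 11), (9, 2, 5, 0, 3), (4, 8, 2, 8, 1, 0, 5), (6, 8, 9), (2, 11, 3, 3)))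
--     8
--     """
--
--     # initialise rumors: each driver knows one rumor
--     rumors = {bus:{bus} for bus in range(len(routes))}
--
--     # drive around the city
--     minutes = 0
--     while minutes <= 1440:
--
--         # exchange rumors between busses that are at the same stop
--         for bus1 in range(len(routes) - 1):
--             stop1 = routes[bus1][minutes % len(routes[bus1])]
--             for bus2 in range(bus1 + 1, len(routes)):
--                 stop2 = routes[bus2][minutes % len(routes[bus2])]
--                 if stop1 == stop2:
--                     rumors[bus1].update(rumors[bus2])
--                     rumors[bus2].update(rumors[bus1])
--
--         # check whether all rumors have been exchanges
--         if all(len(rumors[bus]) == len(routes) for bus in range(len(routes))):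
--             return minutes
--
--         # go to the next stop
--         minutes += 1
--
--     return -1
-- ===== SOURCE B (Python) =====
-- def busgossip(routes):
--     # Faster re-implementation: instead of comparing all O(n^2) bus pairs each
--     # minute, group buses by their current stop in a dict and union the rumor
--     # sets once per stop group (meeting at a stop is an equivalence relation,
--     # so every bus in a group ends up with the union of the group's rumors,
--     # exactly what A's sequential pairwise exchanges produce).
--     n = len(routes)
--     rumors = [{b} for b in range(n)]
--     for minute in range(1441):
--         groups = {}
--         for b in range(n):
--             r = routes[b]
--             stop = r[minute % len(r)]
--             if stop in groups:
--                 groups[stop] |= rumors[b]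
--             else:
--                 groups[stop] = set(rumors[b])
--         rumors = [groups[routes[b][minute % len(routes[b])]] for b in range(n)]
--         if all(len(s) == n for s in rumors):
--             return minute
--     return -1
-- ===== Notes on version B (the rewrite author's own statement) =====
-- stated objective: faster
-- what changed: Instead of scanning all O(n^2) bus pairs every minute and doing sequential pairwise set exchanges, B groups buses by their current stop in a dict once per minute and unions the rumor sets per stop group (meeting-at-a-stop is an equivalence relation, so each bus ends the minute with exactly the union over its group).
-- outside the precondition, e.g. on busgossip([[]]): A returns 0, B raises ZeroDivisionError
import Mathlib
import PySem

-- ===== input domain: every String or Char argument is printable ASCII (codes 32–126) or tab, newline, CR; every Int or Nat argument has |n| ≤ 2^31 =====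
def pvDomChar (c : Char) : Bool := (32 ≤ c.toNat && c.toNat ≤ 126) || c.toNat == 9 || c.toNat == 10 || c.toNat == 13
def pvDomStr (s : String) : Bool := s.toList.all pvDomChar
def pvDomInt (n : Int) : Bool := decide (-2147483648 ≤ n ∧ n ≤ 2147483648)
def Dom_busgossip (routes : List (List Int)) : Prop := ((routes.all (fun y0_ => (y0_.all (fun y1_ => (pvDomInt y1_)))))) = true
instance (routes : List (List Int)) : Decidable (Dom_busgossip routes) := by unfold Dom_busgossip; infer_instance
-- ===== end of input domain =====

-- B replaces A's per-minute O(n^2) pairwise rumor exchanges by grouping buses by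
-- current stop in a dict and unioning rumor sets once per stop group (faster).

-- ===== PORT A =====
-- routes[b][minutes % len(routes[b])]; exact for b < len routes, nonempty route (Pre_), minutes ≥ 0
def pvStopA (routes : List (List Int)) (m b : Nat) : Int :=
  let r := routes.getD b []
  r.getD (m % r.length) 0

-- body of the inner loop: 'if stop1 == stop2: rumors[bus1].update(rumors[bus2]); rumors[bus2].update(rumors[bus1])'
-- (the dict keyed by 0..n-1 is represented positionally: rumors[b] is the b-th list entry)
def pvPairStep (routes : List (List Int)) (m : Nat) (s : List (PySem.Set Nat)) (b1 b2 : Nat) :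
    List (PySem.Set Nat) :=
  if pvStopA routes m b1 = pvStopA routes m b2 then
    let s1 := s.set b1 (PySem.Set.update (s.getD b1 []) (s.getD b2 []))
    s1.set b2 (PySem.Set.update (s1.getD b2 []) (s1.getD b1 []))
  else s

-- the two nested 'for' loops over bus1 in range(n-1), bus2 in range(bus1+1, n)
def pvExchangeA (routes : List (List Int)) (m : Nat) (s : List (PySem.Set Nat)) :
    List (PySem.Set Nat) :=
  (List.range (routes.length - 1)).foldl
    (fun s b1 =>
      (List.range' (b1 + 1) (routes.length - (b1 + 1))).foldl
        (fun s b2 => pvPairStep routes m s b1 b2) s) s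

-- 'while minutes <= 1440: …'
def pvLoopA (routes : List (List Int)) (s : List (PySem.Set Nat)) (minutes : Nat) : Int :=
  if minutes ≤ 1440 then
    let s' := pvExchangeA routes minutes s
    if (List.range routes.length).all
        (fun b => PySem.Set.len (s'.getD b []) == routes.length) then
      (minutes : Int)
    else pvLoopA routes s' (minutes + 1)
  else -1
termination_by 1441 - minutes

def busgossip (routes : List (List Int)) : Int :=
  pvLoopA routes ((List.range routes.length).map (fun b => PySem.Set.ofList [b])) 0

-- ===== PORT B =====
def pvStopB (routes : List (List Int)) (m b : Nat) : Int :=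
  let r := routes.getD b []
  r.getD (m % r.length) 0

-- 'for b in range(n): … groups[stop] |= rumors[b] / groups[stop] = set(rumors[b])'
def pvGroupsB (routes : List (List Int)) (m : Nat) (rumors : List (PySem.Set Nat)) :
    PySem.Dict Int (PySem.Set Nat) :=
  (List.range routes.length).foldl
    (fun g b =>
      let stop := pvStopB routes m b
      if PySem.Dict.contains g stop then
        PySem.Dict.modify g stop [] (fun s => PySem.Set.update s (rumors.getD b []))
      else
        PySem.Dict.insert g stop (PySem.Set.ofList (rumors.getD b [])))
    PySem.Dict.empty

-- 'for minute in range(1441): …'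
def pvLoopB (routes : List (List Int)) (rumors : List (PySem.Set Nat)) (minute : Nat) : Int :=
  if minute < 1441 then
    let g := pvGroupsB routes minute rumors
    let news := (List.range routes.length).map
      (fun b => PySem.Dict.getD g (pvStopB routes minute b) [])
    if news.all (fun s => PySem.Set.len s == routes.length) then (minute : Int)
    else pvLoopB routes news (minute + 1)
  else -1
termination_by 1441 - minute

def busgossip_alt (routes : List (List Int)) : Int :=
  pvLoopB routes ((List.range routes.length).map (fun b => PySem.Set.ofList [b])) 0

-- ===== PRECONDITION & SPEC =====
-- Pre_ requires every route non-empty: on an empty route Python's 'minutes % len(route)'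
-- raises ZeroDivisionError in both programs; the only excluded input on which A still
-- returns is the degenerate one-bus input whose single route is empty, where A's pair
-- loop is empty and the route is never indexed (see cites).
def Pre_busgossip (routes : List (List Int)) : Prop := ∀ r ∈ routes, r ≠ []
instance (routes : List (List Int)) : Decidable (Pre_busgossip routes) := by
  unfold Pre_busgossip; infer_instance

def pvWitness_busgossip : List (List Int) := [[1, 2, 3], [2, 1, 3], [2, 4, 5, 3]]

def Spec_busgossip (routes : List (List Int)) (out : Int) : Prop := out = busgossip_alt routes
instance (routes : List (List Int)) (out : Int) : Decidable (Spec_busgossip routes out) := by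
  unfold Spec_busgossip; infer_instance

-- ===== CLAIM (what is proved, stated in full; the proofs are below) =====
def Claim_equal_busgossip : Prop := ∀ (routes : List (List Int)),
  Dom_busgossip routes → Pre_busgossip routes → Spec_busgossip routes (busgossip routes)

-- ===== LEMMAS AND PROOFS =====

theorem pvGetD_set (l : List (PySem.Set Nat)) (i b : Nat) (v : PySem.Set Nat) :
    (l.set i v).getD b [] = if b = i ∧ i < l.length then v else l.getD b [] := by
  split_ifs with h
  · obtain ⟨rfl, hi⟩ := h
    simp [List.getD, List.getElem?_set_self hi]
  · by_cases hb : b = i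
    · subst hb
      rw [List.set_eq_of_length_le (by omega)]
    · simp [List.getD]
      rw [List.getElem?_set_ne (by omega)]

theorem pvGetD_of_le (l : List (PySem.Set Nat)) (b : Nat) (h : l.length ≤ b) :
    l.getD b [] = [] := by
  simp [List.getD, List.getElem?_eq_none h]

theorem pvLength_pairStep (routes : List (List Int)) (m : Nat) (s : List (PySem.Set Nat))
    (b1 b2 : Nat) : (pvPairStep routes m s b1 b2).length = s.length := by
  unfold pvPairStep; split_ifs <;> simp

theorem pvMem_pairStep_mono (routes : List (List Int)) (m : Nat) (s : List (PySem.Set Nat))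
    (b1 b2 b x : Nat) (hx : x ∈ s.getD b []) :
    x ∈ (pvPairStep routes m s b1 b2).getD b [] := by
  unfold pvPairStep
  split_ifs with h
  · simp only [pvGetD_set]
    split_ifs with h1 h2 h2 <;>
      simp_all [PySem.Set.mem_update]
  · exact hx

theorem pvMem_pairStep_src (routes : List (List Int)) (m : Nat) (s : List (PySem.Set Nat))
    (b1 b2 b x : Nat) (hx : x ∈ (pvPairStep routes m s b1 b2).getD b []) :
    x ∈ s.getD b [] ∨
      (pvStopA routes m b1 = pvStopA routes m b2 ∧ (b = b1 ∨ b = b2) ∧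
        (x ∈ s.getD b1 [] ∨ x ∈ s.getD b2 [])) := by
  unfold pvPairStep at hx
  split_ifs at hx with h
  · simp only [pvGetD_set] at hx
    split_ifs at hx with h1 h2 <;>
      simp_all [PySem.Set.mem_update]
  · exact Or.inl hx


theorem pvSet_nodup (s : List (PySem.Set Nat)) (i : Nat) (v : PySem.Set Nat)
    (h : ∀ b, (s.getD b []).Nodup) (hv : v.Nodup) :
    ∀ b, ((s.set i v).getD b []).Nodup := by
  intro b
  rw [pvGetD_set]
  split_ifs
  · exact hv
  · exact h b

theorem pvPairStep_flow (routes : List (List Int)) (m : Nat) (s : List (PySem.Set Nat))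
    (b1 b2 x : Nat) (h1 : b1 < s.length) (h2 : b2 < s.length) (hne : b1 ≠ b2)
    (hst : pvStopA routes m b1 = pvStopA routes m b2)
    (hx : x ∈ s.getD b1 [] ∨ x ∈ s.getD b2 []) :
    x ∈ (pvPairStep routes m s b1 b2).getD b1 [] ∧
      x ∈ (pvPairStep routes m s b1 b2).getD b2 [] := by
  unfold pvPairStep
  rw [if_pos hst]
  have hlen1 : (s.set b1 (PySem.Set.update (s.getD b1 []) (s.getD b2 []))).length = s.length :=
    List.length_set ..
  constructor
  · rw [pvGetD_set, if_neg (fun h => hne h.1), pvGetD_set, if_pos ⟨rfl, h1⟩]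
    simp only [PySem.Set.mem_update]
    tauto
  · rw [pvGetD_set, if_pos ⟨rfl, by rw [List.length_set]; omega⟩]
    simp only [PySem.Set.mem_update, pvGetD_set]
    split_ifs <;> (try simp only [PySem.Set.mem_update]) <;> tauto

theorem pvNodup_pairStep (routes : List (List Int)) (m : Nat) (s : List (PySem.Set Nat))
    (b1 b2 : Nat) (h : ∀ b, (s.getD b []).Nodup) :
    ∀ b, ((pvPairStep routes m s b1 b2).getD b []).Nodup := by
  unfold pvPairStep
  split_ifs with hst
  · have h1 := pvSet_nodup s b1 (PySem.Set.update (s.getD b1 []) (s.getD b2 [])) h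
      (PySem.Set.nodup_update _ _ (h b1))
    exact pvSet_nodup _ b2 _ h1 (PySem.Set.nodup_update _ _ (h1 b2))
  · exact h

theorem pvLength_inner (routes : List (List Int)) (m b1 : Nat) :
    ∀ (l : List Nat) (s : List (PySem.Set Nat)),
      (l.foldl (fun s b2 => pvPairStep routes m s b1 b2) s).length = s.length := by
  intro l
  induction l with
  | nil => intro s; rfl
  | cons a t ih => intro s; rw [List.foldl_cons, ih, pvLength_pairStep]

theorem pvLength_outer (routes : List (List Int)) (m : Nat) :
    ∀ (L : List Nat) (s : List (PySem.Set Nat)),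
      (L.foldl (fun s b1 =>
        (List.range' (b1 + 1) (routes.length - (b1 + 1))).foldl
          (fun s b2 => pvPairStep routes m s b1 b2) s) s).length = s.length := by
  intro L
  induction L with
  | nil => intro s; rfl
  | cons a t ih => intro s; rw [List.foldl_cons, ih, pvLength_inner]

theorem pvMono_inner (routes : List (List Int)) (m b1 b x : Nat) :
    ∀ (l : List Nat) (s : List (PySem.Set Nat)), x ∈ s.getD b [] →
      x ∈ (l.foldl (fun s b2 => pvPairStep routes m s b1 b2) s).getD b [] := by
  intro l
  induction l with
  | nil => intro s hx; exact hx
  | cons a t ih => intro s hx; exact ih _ (pvMem_pairStep_mono routes m s b1 a b x hx)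

theorem pvMono_outer (routes : List (List Int)) (m b x : Nat) :
    ∀ (L : List Nat) (s : List (PySem.Set Nat)), x ∈ s.getD b [] →
      x ∈ (L.foldl (fun s b1 =>
        (List.range' (b1 + 1) (routes.length - (b1 + 1))).foldl
          (fun s b2 => pvPairStep routes m s b1 b2) s) s).getD b [] := by
  intro L
  induction L with
  | nil => intro s hx; exact hx
  | cons a t ih => intro s hx; exact ih _ (pvMono_inner routes m a b x _ s hx)

theorem pvNodup_inner (routes : List (List Int)) (m b1 : Nat) :
    ∀ (l : List Nat) (s : List (PySem.Set Nat)), (∀ b, (s.getD b []).Nodup) →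
      ∀ b, ((l.foldl (fun s b2 => pvPairStep routes m s b1 b2) s).getD b []).Nodup := by
  intro l
  induction l with
  | nil => intro s hs; exact hs
  | cons a t ih => intro s hs; exact ih _ (pvNodup_pairStep routes m s b1 a hs)

theorem pvNodup_outer (routes : List (List Int)) (m : Nat) :
    ∀ (L : List Nat) (s : List (PySem.Set Nat)), (∀ b, (s.getD b []).Nodup) →
      ∀ b, ((L.foldl (fun s b1 =>
        (List.range' (b1 + 1) (routes.length - (b1 + 1))).foldl
          (fun s b2 => pvPairStep routes m s b1 b2) s) s).getD b []).Nodup := by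
  intro L
  induction L with
  | nil => intro s hs; exact hs
  | cons a t ih => intro s hs; exact ih _ (pvNodup_inner routes m a _ s hs)

-- the ⊆ direction: everything in the exchanged state comes from some bus at the same stop
theorem pvSrc_pairStep (routes : List (List Int)) (m : Nat) (s0 s : List (PySem.Set Nat))
    (b1 b2 : Nat)
    (hP : ∀ b x, x ∈ s.getD b [] →
      ∃ c, c < routes.length ∧ pvStopA routes m c = pvStopA routes m b ∧ x ∈ s0.getD c []) :
    ∀ b x, x ∈ (pvPairStep routes m s b1 b2).getD b [] →
      ∃ c, c < routes.length ∧ pvStopA routes m c = pvStopA routes m b ∧ x ∈ s0.getD c [] := by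
  intro b x hx
  rcases pvMem_pairStep_src routes m s b1 b2 b x hx with h | ⟨hst, hb, hsrc⟩
  · exact hP b x h
  · rcases hsrc with h1 | h2
    · obtain ⟨c, hc, hcs, hcx⟩ := hP b1 x h1
      exact ⟨c, hc, by rcases hb with rfl | rfl <;> simp_all, hcx⟩
    · obtain ⟨c, hc, hcs, hcx⟩ := hP b2 x h2
      exact ⟨c, hc, by rcases hb with rfl | rfl <;> simp_all, hcx⟩

theorem pvSrc_inner (routes : List (List Int)) (m : Nat) (s0 : List (PySem.Set Nat)) (b1 : Nat) :
    ∀ (l : List Nat) (s : List (PySem.Set Nat)),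
      (∀ b x, x ∈ s.getD b [] →
        ∃ c, c < routes.length ∧ pvStopA routes m c = pvStopA routes m b ∧ x ∈ s0.getD c []) →
      ∀ b x, x ∈ (l.foldl (fun s b2 => pvPairStep routes m s b1 b2) s).getD b [] →
        ∃ c, c < routes.length ∧ pvStopA routes m c = pvStopA routes m b ∧ x ∈ s0.getD c [] := by
  intro l
  induction l with
  | nil => intro s hP; exact hP
  | cons a t ih => intro s hP; exact ih _ (pvSrc_pairStep routes m s0 s b1 a hP)

theorem pvSrc_outer (routes : List (List Int)) (m : Nat) (s0 : List (PySem.Set Nat)) :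
    ∀ (L : List Nat) (s : List (PySem.Set Nat)),
      (∀ b x, x ∈ s.getD b [] →
        ∃ c, c < routes.length ∧ pvStopA routes m c = pvStopA routes m b ∧ x ∈ s0.getD c []) →
      ∀ b x, x ∈ (L.foldl (fun s b1 =>
          (List.range' (b1 + 1) (routes.length - (b1 + 1))).foldl
            (fun s b2 => pvPairStep routes m s b1 b2) s) s).getD b [] →
        ∃ c, c < routes.length ∧ pvStopA routes m c = pvStopA routes m b ∧ x ∈ s0.getD c [] := by
  intro L
  induction L with
  | nil => intro s hP; exact hP
  | cons a t ih => intro s hP; exact ih _ (pvSrc_inner routes m s0 a _ s hP)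

-- the ⊇ direction: a rumor flows through the processed pair (i, j)
theorem pvExchangeA_pair (routes : List (List Int)) (m : Nat) (s : List (PySem.Set Nat))
    (i j x : Nat) (hlen : s.length = routes.length) (hij : i < j) (hj : j < routes.length)
    (hst : pvStopA routes m i = pvStopA routes m j)
    (hx : x ∈ s.getD i [] ∨ x ∈ s.getD j []) :
    x ∈ (pvExchangeA routes m s).getD i [] ∧ x ∈ (pvExchangeA routes m s).getD j [] := by
  unfold pvExchangeA
  have hsplit : List.range (routes.length - 1) =
      List.range' 0 i ++ i :: List.range' (i + 1) (routes.length - 1 - i - 1) := by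
    have h1 : List.range' i (routes.length - 1 - i) =
        i :: List.range' (i + 1) (routes.length - 1 - i - 1) := by
      have hk : routes.length - 1 - i = (routes.length - 1 - i - 1) + 1 := by omega
      rw [hk, List.range'_succ]
      simp [Nat.add_comm]
    have h2 := @List.range'_append 0 i (routes.length - 1 - i) 1
    simp only [one_mul, Nat.zero_add] at h2
    rw [List.range_eq_range', ← h1, h2]
    congr 1
    omega
  rw [hsplit, List.foldl_append, List.foldl_cons]
  set s1 := (List.range' 0 i).foldl (fun s b1 =>
    (List.range' (b1 + 1) (routes.length - (b1 + 1))).foldl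
      (fun s b2 => pvPairStep routes m s b1 b2) s) s with hs1
  have hlen1 : s1.length = routes.length := by rw [hs1, pvLength_outer, hlen]
  have hx1 : x ∈ s1.getD i [] ∨ x ∈ s1.getD j [] :=
    hx.imp (pvMono_outer routes m i x _ s) (pvMono_outer routes m j x _ s)
  have hinner : List.range' (i + 1) (routes.length - (i + 1)) =
      List.range' (i + 1) (j - i - 1) ++ j :: List.range' (j + 1) (routes.length - j - 1) := by
    have h1 : List.range' j (routes.length - j) =
        j :: List.range' (j + 1) (routes.length - j - 1) := by
      have hk : routes.length - j = (routes.length - j - 1) + 1 := by omega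
      rw [hk, List.range'_succ]
      simp [Nat.add_comm]
    have h2 := @List.range'_append (i + 1) (j - i - 1) (routes.length - j) 1
    have hj' : i + 1 + 1 * (j - i - 1) = j := by omega
    rw [hj'] at h2
    rw [← h1, h2]
    congr 1
    omega
  rw [hinner, List.foldl_append, List.foldl_cons]
  set s2 := (List.range' (i + 1) (j - i - 1)).foldl
    (fun s b2 => pvPairStep routes m s i b2) s1 with hs2
  have hlen2 : s2.length = routes.length := by rw [hs2, pvLength_inner, hlen1]
  have hx2 : x ∈ s2.getD i [] ∨ x ∈ s2.getD j [] :=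
    hx1.imp (pvMono_inner routes m i i x _ s1) (pvMono_inner routes m i j x _ s1)
  have hflow := pvPairStep_flow routes m s2 i j x (by omega) (by omega) (by omega) hst hx2
  constructor
  · exact pvMono_outer routes m i x _ _
      (pvMono_inner routes m i i x _ _ hflow.1)
  · exact pvMono_outer routes m j x _ _
      (pvMono_inner routes m i j x _ _ hflow.2)

-- the per-minute characterisation of A's double loop
theorem pvMem_exchangeA (routes : List (List Int)) (m : Nat) (s : List (PySem.Set Nat))
    (hlen : s.length = routes.length) (b x : Nat) (hb : b < routes.length) :
    x ∈ (pvExchangeA routes m s).getD b [] ↔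
      ∃ c, c < routes.length ∧ pvStopA routes m c = pvStopA routes m b ∧ x ∈ s.getD c [] := by
  constructor
  · intro hx
    refine pvSrc_outer routes m s _ s ?_ b x hx
    intro b' x' hx'
    by_cases hb' : b' < routes.length
    · exact ⟨b', hb', rfl, hx'⟩
    · rw [pvGetD_of_le s b' (by omega)] at hx'
      cases hx'
  · rintro ⟨c, hc, hst, hx⟩
    by_cases hcb : c = b
    · subst hcb
      exact pvMono_outer routes m c x _ s hx
    · rcases Nat.lt_or_ge c b with hlt | hge
      · exact (pvExchangeA_pair routes m s c b x hlen hlt hb hst (Or.inl hx)).2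
      · have hbc : b < c := by omega
        exact (pvExchangeA_pair routes m s b c x hlen hbc hc hst.symm (Or.inr hx)).1

theorem pvLength_exchangeA (routes : List (List Int)) (m : Nat) (s : List (PySem.Set Nat)) :
    (pvExchangeA routes m s).length = s.length := pvLength_outer routes m _ s

theorem pvNodup_exchangeA (routes : List (List Int)) (m : Nat) (s : List (PySem.Set Nat))
    (hs : ∀ b, (s.getD b []).Nodup) : ∀ b, ((pvExchangeA routes m s).getD b []).Nodup :=
  pvNodup_outer routes m _ s hs

theorem pvStopB_eq_pvStopA : pvStopB = pvStopA := rfl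

theorem pvMem_groups_fold (routes : List (List Int)) (m : Nat) (rumors : List (PySem.Set Nat)) :
    ∀ (l : List Nat) (g : PySem.Dict Int (PySem.Set Nat)) (t : Int) (x : Nat),
      (x ∈ (l.foldl (fun g b =>
          let stop := pvStopB routes m b
          if PySem.Dict.contains g stop then
            PySem.Dict.modify g stop [] (fun s => PySem.Set.update s (rumors.getD b []))
          else
            PySem.Dict.insert g stop (PySem.Set.ofList (rumors.getD b []))) g).getD t []) ↔
        x ∈ g.getD t [] ∨ ∃ c ∈ l, pvStopB routes m c = t ∧ x ∈ rumors.getD c [] := by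
  intro l
  induction l with
  | nil => intro g t x; simp
  | cons a l ih =>
    intro g t x
    rw [List.foldl_cons, ih]
    have hstep : (x ∈ (if PySem.Dict.contains g (pvStopB routes m a) then
          PySem.Dict.modify g (pvStopB routes m a) []
            (fun s => PySem.Set.update s (rumors.getD a []))
        else
          PySem.Dict.insert g (pvStopB routes m a)
            (PySem.Set.ofList (rumors.getD a []))).getD t []) ↔
        x ∈ g.getD t [] ∨ (pvStopB routes m a = t ∧ x ∈ rumors.getD a []) := by
      split_ifs with hc
      · rw [PySem.Dict.getD_modify]
        split_ifs with ht
        · subst ht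
          simp [PySem.Set.mem_update]
        · tauto
      · rw [PySem.Dict.getD_insert]
        split_ifs with ht
        · subst ht
          rw [PySem.Dict.getD_of_not_contains g [] (by simpa using hc)]
          simp [PySem.Set.mem_ofList]
        · tauto
    constructor
    · rintro (h | ⟨c, hc, hcs, hcx⟩)
      · rcases hstep.mp h with h' | h' <;> tauto
      · exact Or.inr ⟨c, by simp [hc], hcs, hcx⟩
    · rintro (h | ⟨c, hc, hcs, hcx⟩)
      · exact Or.inl (hstep.mpr (Or.inl h))
      · rcases List.mem_cons.mp hc with rfl | hc'
        · exact Or.inl (hstep.mpr (Or.inr ⟨hcs, hcx⟩))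
        · exact Or.inr ⟨c, hc', hcs, hcx⟩

theorem pvNodup_groups_fold (routes : List (List Int)) (m : Nat) (rumors : List (PySem.Set Nat)) :
    ∀ (l : List Nat) (g : PySem.Dict Int (PySem.Set Nat)),
      (∀ t, ((g.getD t []) : PySem.Set Nat).Nodup) →
      ∀ t, (((l.foldl (fun g b =>
          let stop := pvStopB routes m b
          if PySem.Dict.contains g stop then
            PySem.Dict.modify g stop [] (fun s => PySem.Set.update s (rumors.getD b []))
          else
            PySem.Dict.insert g stop (PySem.Set.ofList (rumors.getD b []))) g).getD t []) :
          PySem.Set Nat).Nodup := by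
  intro l
  induction l with
  | nil => intro g hg; exact hg
  | cons a l ih =>
    intro g hg
    rw [List.foldl_cons]
    apply ih
    intro t
    dsimp only
    split_ifs with hc
    · rw [PySem.Dict.getD_modify]
      split_ifs
      · exact PySem.Set.nodup_update _ _ (hg _)
      · exact hg t
    · rw [PySem.Dict.getD_insert]
      split_ifs
      · exact PySem.Set.nodup_ofList _
      · exact hg t

theorem pvMem_groupsB (routes : List (List Int)) (m : Nat) (rumors : List (PySem.Set Nat))
    (t : Int) (x : Nat) :
    x ∈ (pvGroupsB routes m rumors).getD t [] ↔
      ∃ c, c < routes.length ∧ pvStopB routes m c = t ∧ x ∈ rumors.getD c [] := by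
  unfold pvGroupsB
  rw [pvMem_groups_fold]
  simp [PySem.Dict.getD_empty, List.mem_range]

theorem pvNodup_groupsB (routes : List (List Int)) (m : Nat) (rumors : List (PySem.Set Nat))
    (t : Int) : (((pvGroupsB routes m rumors).getD t []) : PySem.Set Nat).Nodup := by
  unfold pvGroupsB
  apply pvNodup_groups_fold
  intro u
  rw [PySem.Dict.getD_empty]
  exact List.nodup_nil

theorem pvGetD_map_range (n : Nat) (f : Nat → PySem.Set Nat) (b : Nat) (h : b < n) :
    ((List.range n).map f).getD b [] = f b := by
  simp [List.getD, List.getElem?_map, List.getElem?_range h]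

theorem pvAll_congr_mem (l : List Nat) (p q : Nat → Bool) (h : ∀ x ∈ l, p x = q x) :
    l.all p = l.all q := by
  induction l with
  | nil => rfl
  | cons a t ih =>
    simp only [List.all_cons, h a (by simp), ih (fun x hx => h x (by simp [hx]))]

theorem pvLoop_eq (routes : List (List Int)) :
    ∀ (k m : Nat) (sA sB : List (PySem.Set Nat)),
      1441 - m ≤ k →
      sA.length = routes.length → sB.length = routes.length →
      (∀ b, (sA.getD b []).Nodup) → (∀ b, (sB.getD b []).Nodup) →
      (∀ b x, x ∈ sA.getD b [] ↔ x ∈ sB.getD b []) →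
      pvLoopA routes sA m = pvLoopB routes sB m := by
  intro k
  induction k with
  | zero =>
    intro m sA sB hk _ _ _ _ _
    rw [pvLoopA, pvLoopB, if_neg (by omega), if_neg (by omega)]
  | succ k ih =>
    intro m sA sB hk hlA hlB hnA hnB hmem
    by_cases hm : m ≤ 1440
    · have hsA' : (pvExchangeA routes m sA).length = routes.length := by
        rw [pvLength_exchangeA, hlA]
      have hnews : ((List.range routes.length).map
          (fun b => PySem.Dict.getD (pvGroupsB routes m sB) (pvStopB routes m b) [])).length =
            routes.length := by simp
      have hmem' : ∀ b x, x ∈ (pvExchangeA routes m sA).getD b [] ↔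
          x ∈ ((List.range routes.length).map
            (fun b => PySem.Dict.getD (pvGroupsB routes m sB) (pvStopB routes m b) [])).getD b [] := by
        intro b x
        by_cases hb : b < routes.length
        · rw [pvMem_exchangeA routes m sA hlA b x hb, pvGetD_map_range _ _ _ hb, pvMem_groupsB]
          simp only [pvStopB_eq_pvStopA]
          constructor
          · rintro ⟨c, hc, hst, hx⟩; exact ⟨c, hc, hst, (hmem c x).mp hx⟩
          · rintro ⟨c, hc, hst, hx⟩; exact ⟨c, hc, hst, (hmem c x).mpr hx⟩
        · rw [pvGetD_of_le _ b (by omega : (pvExchangeA routes m sA).length ≤ b),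
            pvGetD_of_le _ b (by omega : ((List.range routes.length).map
              (fun b => PySem.Dict.getD (pvGroupsB routes m sB) (pvStopB routes m b) [])).length ≤ b)]
      have hnA' : ∀ b, ((pvExchangeA routes m sA).getD b []).Nodup :=
        pvNodup_exchangeA routes m sA hnA
      have hnB' : ∀ b, (((List.range routes.length).map
          (fun b => PySem.Dict.getD (pvGroupsB routes m sB) (pvStopB routes m b) [])).getD b []).Nodup := by
        intro b
        by_cases hb : b < routes.length
        · rw [pvGetD_map_range _ _ _ hb]; exact pvNodup_groupsB routes m sB _
        · rw [pvGetD_of_le _ b (by omega : ((List.range routes.length).map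
              (fun b => PySem.Dict.getD (pvGroupsB routes m sB) (pvStopB routes m b) [])).length ≤ b)]
          exact List.nodup_nil
      have hlen_eq : ∀ b, ((pvExchangeA routes m sA).getD b []).length =
          (((List.range routes.length).map
            (fun b => PySem.Dict.getD (pvGroupsB routes m sB) (pvStopB routes m b) [])).getD b []).length := by
        intro b
        exact List.Perm.length_eq
          (((List.perm_ext_iff_of_nodup (hnA' b) (hnB' b))).mpr (fun a => hmem' b a))
      have hcond : ((List.range routes.length).all
          (fun b => PySem.Set.len ((pvExchangeA routes m sA).getD b []) == routes.length)) =
          (((List.range routes.length).map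
            (fun b => PySem.Dict.getD (pvGroupsB routes m sB) (pvStopB routes m b) [])).all
              (fun s => PySem.Set.len s == routes.length)) := by
        rw [List.all_map]
        apply pvAll_congr_mem
        intro b hb
        have hb' : b < routes.length := List.mem_range.mp hb
        have := hlen_eq b
        rw [pvGetD_map_range _ _ _ hb'] at this
        simp only [Function.comp, PySem.Set.len, this]
      rw [pvLoopA, pvLoopB, if_pos hm, if_pos (show m < 1441 by omega)]
      simp only []
      rw [hcond]
      split_ifs with hdone
      · rfl
      · exact ih (m + 1) _ _ (by omega) hsA' hnews hnA' hnB' hmem'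
    · rw [pvLoopA, pvLoopB, if_neg hm, if_neg (by omega)]

-- ===== VERDICT (by name: the statement is the Claim_ definition above) =====
theorem busgossip_spec : Claim_equal_busgossip := by
  intro routes _ _
  unfold Spec_busgossip
  unfold busgossip busgossip_alt
  apply pvLoop_eq routes 1441 0 _ _ (by omega) (by simp) (by simp)
  · intro b
    by_cases hb : b < routes.length
    · rw [pvGetD_map_range _ _ _ hb]; exact PySem.Set.nodup_ofList _
    · rw [pvGetD_of_le _ b (by simpa using hb)]; exact List.nodup_nil
  · intro b
    by_cases hb : b < routes.length
    · rw [pvGetD_map_range _ _ _ hb]; exact PySem.Set.nodup_ofList _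
    · rw [pvGetD_of_le _ b (by simpa using hb)]; exact List.nodup_nil
  · exact fun b x => Iff.rfl
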